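-- pv_equiv track=rewrite | github.com/jonfriskics/advent_of_code2024 | day09.py | find_dot_group_by_length
-- ===== SOURCE A (Python) =====
-- def find_dot_group_by_length(og_blocks, length):
--     current_group = []
--
--     for i, char in enumerate(og_blocks):
--         if char == '.':
--             current_group.append(i)
--             if len(current_group) == length:
--                 return current_group
--         else:
--             current_group = []
--
--     return []
-- ===== SOURCE B (Python) =====
-- def find_dot_group_by_length(og_blocks, length):
--     if length < 1 or len(og_blocks) < length:
--         return []
--     marker = ''.join('.' if c == '.' else 'x' for c in og_blocks)
--     start = marker.find('.' * length)
--     return [] if start == -1 else list(range(start, start + length))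
-- ===== Notes on version B (the rewrite author's own statement) =====
-- stated objective: idiomatic
-- what changed: Replaces the accumulate-and-reset index-list loop with a single substring search: map the blocks to a marker string, find the first occurrence of a run of `length` dots with str.find, and build the answer as one range.
import Mathlib
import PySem

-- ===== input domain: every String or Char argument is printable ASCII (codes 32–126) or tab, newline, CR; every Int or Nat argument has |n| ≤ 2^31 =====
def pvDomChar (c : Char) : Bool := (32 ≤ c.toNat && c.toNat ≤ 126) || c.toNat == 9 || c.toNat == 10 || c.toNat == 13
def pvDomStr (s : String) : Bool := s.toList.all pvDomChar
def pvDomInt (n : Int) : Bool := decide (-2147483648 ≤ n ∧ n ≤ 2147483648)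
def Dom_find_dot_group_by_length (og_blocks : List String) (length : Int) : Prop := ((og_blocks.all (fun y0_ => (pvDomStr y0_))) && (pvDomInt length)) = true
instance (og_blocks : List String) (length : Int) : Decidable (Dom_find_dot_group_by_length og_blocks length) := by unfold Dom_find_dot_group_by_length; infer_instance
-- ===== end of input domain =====

-- B replaces A's accumulate-and-reset loop by one substring search (str.find of a run of dots); idiomatic, return value only.

-- ===== PORT A =====
-- the loop `for i, char in enumerate(og_blocks): …` with accumulator current_group
def find_dot_group_by_length_go (length : Int) : List (Int × String) → List Int → List Int
  | [], _ => []
  | (i, ch) :: rest, cur =>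
    if ch == "." then
      let cur' := cur ++ [i]
      if PySem.List.len cur' = length then cur' else find_dot_group_by_length_go length rest cur'
    else find_dot_group_by_length_go length rest []

def find_dot_group_by_length (og_blocks : List String) (length : Int) : List Int :=
  find_dot_group_by_length_go length (PySem.List.enumerate og_blocks 0) []

-- ===== PORT B =====
def find_dot_group_by_length_alt (og_blocks : List String) (length : Int) : List Int :=
  -- if length < 1 or len(og_blocks) < length: return []   (no run of that length can fit)
  if length < 1 ∨ PySem.List.len og_blocks < length then []
  else
    -- marker = ''.join('.' if c == '.' else 'x' for c in og_blocks)  (a string of single chars = List Char)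
    let marker : List Char := og_blocks.map (fun c => if c == "." then '.' else 'x')
    -- start = marker.find('.' * length)
    let start := PySem.Chars.find marker (PySem.List.pyRepeat ['.'] length)
    if start == -1 then [] else PySem.List.pyRange start (start + length) 1

-- ===== PRECONDITION & SPEC =====
def Spec_find_dot_group_by_length (og_blocks : List String) (length : Int) (out : List Int) : Prop := out = find_dot_group_by_length_alt og_blocks length
instance (og_blocks : List String) (length : Int) (out : List Int) : Decidable (Spec_find_dot_group_by_length og_blocks length out) := by unfold Spec_find_dot_group_by_length; infer_instance

-- ===== CLAIM (what is proved, stated in full; the proofs are below) =====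
def Claim_equal_find_dot_group_by_length : Prop := ∀ (og_blocks : List String) (length : Int), Dom_find_dot_group_by_length og_blocks length → Spec_find_dot_group_by_length og_blocks length (find_dot_group_by_length og_blocks length)

-- ===== LEMMAS AND PROOFS =====

def pvF (p : List Char) : List Char → Option Nat
  | [] => if p <+: ([] : List Char) then some 0 else none
  | c :: t => if p <+: c :: t then some 0 else (pvF p t).map (· + 1)

theorem pvF_some (p m : List Char) (j : Nat) (h : pvF p m = some j) :
    p <+: m.drop j ∧ ∀ i < j, ¬ p <+: m.drop i := by
  induction m generalizing j with
  | nil =>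
    simp only [pvF] at h
    split at h
    · rename_i hp; cases h; exact ⟨hp, by omega⟩
    · cases h
  | cons c t ih =>
    simp only [pvF] at h
    split at h
    · rename_i hp; cases h; exact ⟨hp, by omega⟩
    · rename_i hp
      rcases Option.map_eq_some_iff.mp h with ⟨j', hj', rfl⟩
      obtain ⟨h1, h2⟩ := ih j' hj'
      refine ⟨by simpa using h1, ?_⟩
      intro i hi
      cases i with
      | zero => simpa using hp
      | succ i' => simpa using h2 i' (by omega)

theorem pvF_none (p m : List Char) (h : pvF p m = none) : ∀ j, ¬ p <+: m.drop j := by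
  induction m with
  | nil =>
    simp only [pvF] at h
    split at h
    · cases h
    · rename_i hp; intro j; simpa using hp
  | cons c t ih =>
    simp only [pvF] at h
    split at h
    · cases h
    · rename_i hp
      have ht := Option.map_eq_none_iff.mp h
      intro j
      cases j with
      | zero => simpa using hp
      | succ j' => simpa using ih ht j'

theorem pvF_none_of_short (p m : List Char) (h : m.length < p.length) : pvF p m = none := by
  induction m with
  | nil =>
    simp only [pvF]
    split
    · rename_i hp; have := hp.length_le
      simp only [List.length_nil] at this h; omega
    · rfl
  | cons c t ih =>
    simp only [pvF]
    split
    · rename_i hp; have := hp.length_le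
      simp only [List.length_cons] at this h; omega
    · rw [ih (by simp only [List.length_cons] at h; omega)]; rfl

theorem not_prefix_run (k L : Nat) (hk : k < L) (t : List Char) :
    ¬ (List.replicate L '.' <+: List.replicate k '.' ++ 'x' :: t) := by
  induction k generalizing L with
  | zero =>
    obtain ⟨L', rfl⟩ : ∃ L', L = L' + 1 := ⟨L - 1, by omega⟩
    intro hp
    rw [List.replicate_succ] at hp
    simp only [List.replicate_zero, List.nil_append] at hp
    exact absurd (List.cons_prefix_cons.mp hp).1 (by decide)
  | succ k' ih =>
    obtain ⟨L', rfl⟩ : ∃ L', L = L' + 1 := ⟨L - 1, by omega⟩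
    intro hp
    rw [List.replicate_succ, List.replicate_succ] at hp
    simp only [List.cons_append] at hp
    exact ih L' (by omega) (List.cons_prefix_cons.mp hp).2

theorem pvF_shift (L k : Nat) (hk : k < L) (t : List Char) :
    pvF (List.replicate L '.') (List.replicate k '.' ++ 'x' :: t)
      = (pvF (List.replicate L '.') t).map (· + (k + 1)) := by
  induction k with
  | zero =>
    have hnp : ¬ List.replicate L '.' <+: 'x' :: t := by
      have := not_prefix_run 0 L hk t
      simpa using this
    rw [show List.replicate 0 '.' ++ 'x' :: t = 'x' :: t by simp]
    rw [show pvF (List.replicate L '.') ('x' :: t)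
        = (pvF (List.replicate L '.') t).map (· + 1) from by
      simp only [pvF, if_neg hnp]]
  | succ k' ih =>
    have hnp : ¬ List.replicate L '.' <+: '.' :: (List.replicate k' '.' ++ 'x' :: t) := by
      have := not_prefix_run (k' + 1) L hk t
      simpa [List.replicate_succ] using this
    rw [show List.replicate (k' + 1) '.' ++ 'x' :: t
        = '.' :: (List.replicate k' '.' ++ 'x' :: t) by simp [List.replicate_succ]]
    rw [show pvF (List.replicate L '.') ('.' :: (List.replicate k' '.' ++ 'x' :: t))
        = (pvF (List.replicate L '.') (List.replicate k' '.' ++ 'x' :: t)).map (· + 1) from by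
      simp only [pvF, if_neg hnp]]
    rw [ih (by omega)]
    cases pvF (List.replicate L '.') t
    · simp
    · simp only [Option.map_some]
      congr 1

theorem find_eq_pvF (m p : List Char) :
    PySem.Chars.find m p = match pvF p m with | some j => (j : Int) | none => -1 := by
  cases hF : pvF p m with
  | none =>
    have hno := pvF_none p m hF
    rw [PySem.Chars.find_eq_neg_one_iff]
    intro hinf
    obtain ⟨j, hj⟩ := (PySem.Chars.exists_prefix_drop_iff_isIn p m).mpr
      ((PySem.Chars.isIn_iff_infix p m).mpr hinf)
    exact hno j hj
  | some j =>
    obtain ⟨h1, h2⟩ := pvF_some p m j hF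
    have hinf : p <:+: m := (PySem.Chars.isIn_iff_infix p m).mp
      ((PySem.Chars.exists_prefix_drop_iff_isIn p m).mp ⟨j, h1⟩)
    have hnn : 0 ≤ PySem.Chars.find m p := (PySem.Chars.find_nonneg_iff m p).mpr hinf
    obtain ⟨hs1, hs2⟩ := PySem.Chars.find_spec hnn
    have hje : (PySem.Chars.find m p).toNat = j := by
      by_contra hne
      rcases Nat.lt_or_ge (PySem.Chars.find m p).toNat j with h | h
      · exact h2 _ h hs1
      · exact hs2 j (by omega) h1
    show PySem.Chars.find m p = (j : Int)
    omega

theorem go_nonpos (length : Int) (hL : length ≤ 0) :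
    ∀ (e : List (Int × String)) (cur : List Int), find_dot_group_by_length_go length e cur = [] := by
  intro e
  induction e with
  | nil => intro cur; simp [find_dot_group_by_length_go]
  | cons hd tl ih =>
    intro cur
    obtain ⟨i, ch⟩ := hd
    simp only [find_dot_group_by_length_go]
    split
    · rw [if_neg, ih]
      simp only [PySem.List.len_eq, List.length_append, List.length_singleton]
      intro h
      omega
    · exact ih []

theorem go_eq_pvF (L : Nat) (hL : 1 ≤ L) :
    ∀ (xs : List String) (s k : Nat), k ≤ s → k < L →
    find_dot_group_by_length_go (L : Int) (PySem.List.enumerate xs (s : Int))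
        (PySem.List.pyRange ((s : Int) - k) s 1)
      = match pvF (List.replicate L '.') (List.replicate k '.' ++ xs.map (fun c => if c == "." then '.' else 'x')) with
        | some j => PySem.List.pyRange ((s : Int) - k + j) ((s : Int) - k + j + L) 1
        | none => []
  | [], s, k, hks, hkL => by
    rw [PySem.List.enumerate_nil]
    rw [pvF_none_of_short _ _ (by simp; omega)]
    rfl
  | c :: t, s, k, hks, hkL => by
    rw [PySem.List.enumerate_cons]
    simp only [find_dot_group_by_length_go, List.map_cons]
    have hcur : PySem.List.pyRange ((s : Int) - k) s 1 ++ [(s : Int)]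
        = PySem.List.pyRange ((s : Int) - k) ((s : Int) + 1) 1 :=
      (PySem.List.pyRange_one_succ_right (show (s : Int) - k ≤ s by omega)).symm
    have hlen : PySem.List.len (PySem.List.pyRange ((s : Int) - k) s 1 ++ [(s : Int)]) = ((k : Int) + 1) := by
      simp only [PySem.List.len_eq, List.length_append, List.length_singleton,
        PySem.List.length_pyRange_one]
      omega
    by_cases hc : c == "."
    · simp only [if_pos hc]
      have hext : List.replicate k '.' ++ '.' :: t.map (fun c => if c == "." then '.' else 'x')
          = List.replicate (k + 1) '.' ++ t.map (fun c => if c == "." then '.' else 'x') := by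
        simp [List.replicate_succ']
      by_cases hkl : k + 1 = L
      · -- the group is complete: A returns it; the run of L dots sits at offset 0
        simp only [hlen, if_pos (show ((k : Int) + 1) = ((L : Nat) : Int) from by omega)]
        have hpre : List.replicate L '.' <+: List.replicate (k + 1) '.' ++ t.map (fun c => if c == "." then '.' else 'x') := by
          rw [hkl]; exact List.prefix_append _ _
        rw [hext, show pvF (List.replicate L '.') (List.replicate (k + 1) '.' ++ t.map (fun c => if c == "." then '.' else 'x')) = some 0 from by
          cases hh : List.replicate (k + 1) '.' ++ t.map (fun c => if c == "." then '.' else 'x') with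
          | nil => simp [pvF, hh ▸ hpre]
          | cons a b => simp [pvF, hh ▸ hpre]]
        rw [hcur]
        congr 1 <;> omega
      · -- keep scanning with the longer group
        simp only [hlen, if_neg (show ¬ ((k : Int) + 1) = ((L : Nat) : Int) from by omega)]
        rw [hcur]
        rw [show ((s : Int) + 1) = (((s + 1 : Nat) : Int)) by push_cast; ring]
        rw [show ((s : Int) - k) = (((s + 1 : Nat) : Int)) - ((k + 1 : Nat) : Int) by push_cast; ring]
        rw [go_eq_pvF L hL t (s + 1) (k + 1) (by omega) (by omega)]
        rw [hext]
    · simp only [if_neg hc]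
      have hrec := go_eq_pvF L hL t (s + 1) 0 (by omega) (by omega)
      rw [show PySem.List.pyRange (((s + 1 : Nat) : Int) - ((0 : Nat) : Int)) ((s + 1 : Nat) : Int) 1 = [] from
        PySem.List.pyRange_one_eq_nil (by push_cast; omega)] at hrec
      simp only [List.replicate_zero, List.nil_append] at hrec
      rw [show ((s : Int) + 1) = (((s + 1 : Nat) : Int)) by push_cast; ring]
      rw [hrec, pvF_shift L k hkL]
      cases pvF (List.replicate L '.') (t.map (fun c => if c == "." then '.' else 'x'))
      · rfl
      · simp only [Option.map_some]
        congr 1 <;> push_cast <;> omega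


theorem pv_main (og_blocks : List String) (length : Int) :
    find_dot_group_by_length og_blocks length = find_dot_group_by_length_alt og_blocks length := by
  unfold find_dot_group_by_length find_dot_group_by_length_alt
  by_cases hg : length < 1 ∨ PySem.List.len og_blocks < length
  · rw [if_pos hg]
    by_cases h1 : length ≤ 0
    · exact go_nonpos length h1 _ _
    · have hL1 : 1 ≤ length.toNat := by omega
      have hcast : ((length.toNat : Nat) : Int) = length := Int.toNat_of_nonneg (by omega)
      have hA := go_eq_pvF length.toNat hL1 og_blocks 0 0 (le_refl 0) (by omega)
      rw [show PySem.List.pyRange (((0 : Nat) : Int) - ((0 : Nat) : Int)) ((0 : Nat) : Int) 1 = [] from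
        PySem.List.pyRange_one_eq_nil (by simp)] at hA
      simp only [List.replicate_zero, List.nil_append, Nat.cast_zero] at hA
      rw [pvF_none_of_short _ _ (by
        simp only [List.length_map, List.length_replicate]
        have := hg.resolve_left (by omega)
        simp only [PySem.List.len_eq] at this
        omega)] at hA
      rw [hcast] at hA
      exact hA
  · rw [if_neg hg]
    have hg1 : 1 ≤ length := by omega
    simp only [PySem.List.pyRepeat_singleton]
    have hL1 : 1 ≤ length.toNat := by omega
    have hcast : ((length.toNat : Nat) : Int) = length := Int.toNat_of_nonneg (by omega)
    have hA := go_eq_pvF length.toNat hL1 og_blocks 0 0 (le_refl 0) (by omega)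
    rw [show PySem.List.pyRange (((0 : Nat) : Int) - ((0 : Nat) : Int)) ((0 : Nat) : Int) 1 = [] from
      PySem.List.pyRange_one_eq_nil (by simp)] at hA
    simp only [List.replicate_zero, List.nil_append, Nat.cast_zero] at hA
    rw [hcast] at hA
    rw [hA, find_eq_pvF]
    cases pvF (List.replicate length.toNat '.') (og_blocks.map (fun c => if c == "." then '.' else 'x')) with
    | none => rw [if_pos (by decide)]
    | some j =>
      rw [if_neg (show ¬ (((j : Int) == -1) = true) from by simp)]
      show PySem.List.pyRange (0 - 0 + (j : Int)) (0 - 0 + (j : Int) + length) 1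
          = PySem.List.pyRange (j : Int) ((j : Int) + length) 1
      congr 1 <;> omega

-- ===== VERDICT (by name: the statement is the Claim_ definition above) =====
theorem find_dot_group_by_length_spec : Claim_equal_find_dot_group_by_length := by
  intro og_blocks length _hdom
  unfold Spec_find_dot_group_by_length
  exact pv_main og_blocks length
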